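-- pv_equiv track=rewrite | github.com/molatho/digiduck | ducktoolkit/encoder.py | add_delay
-- ===== SOURCE A (Python) =====
-- def add_delay(delay_value):
--
--     delay_return = []
--
--     # divide by 255 add that many 0xff
--     # convert the reminder to hex
--     # e.g. 750 = FF FF F0
--     while delay_value > 0:
--         if delay_value > 255:
--             delay_return.extend([0x00, 0xFF])
--             delay_value -= 255
--         else:
--             delay_return.extend([0x00, delay_value])
--             delay_value = 0
--     return delay_return
-- ===== SOURCE B (Python) =====
-- def add_delay(delay_value):
--     if delay_value <= 0:
--         return []
--     count = (delay_value - 1) // 255      # number of full 0xFF pairs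
--     rem = delay_value - 255 * count       # final byte, in 1..255
--     return [0x00, 0xFF] * count + [0x00, rem]
-- ===== Notes on version B (the rewrite author's own statement) =====
-- stated objective: faster
-- what changed: replaced A's repeated-subtraction Python loop by a closed-form count of full 0xFF pairs ((n-1)//255) and direct list replication
import Mathlib
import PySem

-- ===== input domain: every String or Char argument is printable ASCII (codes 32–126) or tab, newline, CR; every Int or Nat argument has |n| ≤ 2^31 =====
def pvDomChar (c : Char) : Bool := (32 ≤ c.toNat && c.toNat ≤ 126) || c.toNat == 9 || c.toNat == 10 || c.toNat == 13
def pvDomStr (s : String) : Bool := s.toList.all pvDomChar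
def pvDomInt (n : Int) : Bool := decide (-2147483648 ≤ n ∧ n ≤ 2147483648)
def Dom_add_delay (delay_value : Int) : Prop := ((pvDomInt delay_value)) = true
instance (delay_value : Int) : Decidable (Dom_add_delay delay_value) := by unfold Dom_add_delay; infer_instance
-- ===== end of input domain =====

-- B replaces A's repeated-subtraction loop by a closed-form pair count and list replication (objective: faster by a constant factor in Python).

-- ===== PORT A =====
-- literal port of A's while-loop: subtract 255 while the value exceeds 255
def add_delay (delay_value : Int) : List Int :=
  if delay_value > 0 then
    if delay_value > 255 then
      [0x00, 0xFF] ++ add_delay (delay_value - 255)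
    else
      [0x00, delay_value]
  else []
termination_by delay_value.toNat
decreasing_by omega

-- ===== PORT B =====
def add_delay_alt (delay_value : Int) : List Int :=
  if delay_value ≤ 0 then []
  else
    let count := PySem.Int.floordiv (delay_value - 1) 255
    let rem := delay_value - 255 * count
    (List.replicate count.toNat ([0x00, 0xFF])).flatten ++ [0x00, rem]

-- ===== PRECONDITION & SPEC =====
def Spec_add_delay (delay_value : Int) (out : List Int) : Prop := out = add_delay_alt delay_value
instance (delay_value : Int) (out : List Int) : Decidable (Spec_add_delay delay_value out) := by unfold Spec_add_delay; infer_instance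

-- ===== CLAIM (what is proved, stated in full; the proofs are below) =====
def Claim_equal_add_delay : Prop := ∀ (delay_value : Int), Dom_add_delay delay_value → Spec_add_delay delay_value (add_delay delay_value)

-- ===== LEMMAS AND PROOFS =====

theorem add_delay_alt_base (d : Int) (h0 : 0 < d) (h : d ≤ 255) :
    add_delay_alt d = [0, d] := by
  unfold add_delay_alt
  rw [if_neg (by omega)]
  have hc : (d - 1) / 255 = 0 := by omega
  simp [PySem.Int.floordiv_eq_ediv_of_pos (by omega : (0:Int) < 255), hc]

theorem add_delay_alt_step (d : Int) (h : 255 < d) :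
    add_delay_alt d = [0, 255] ++ add_delay_alt (d - 255) := by
  unfold add_delay_alt
  rw [if_neg (by omega), if_neg (by omega)]
  have hc : PySem.Int.floordiv (d - 1) 255 = PySem.Int.floordiv (d - 255 - 1) 255 + 1 := by
    rw [PySem.Int.floordiv_eq_ediv_of_pos (by omega),
        PySem.Int.floordiv_eq_ediv_of_pos (by omega)]
    omega
  have hnn : 0 ≤ PySem.Int.floordiv (d - 255 - 1) 255 := by
    rw [PySem.Int.floordiv_eq_ediv_of_pos (by omega)]; omega
  simp only [hc]
  have ht : (PySem.Int.floordiv (d - 255 - 1) 255 + 1).toNat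
      = (PySem.Int.floordiv (d - 255 - 1) 255).toNat + 1 := by omega
  rw [ht, List.replicate_succ]
  have hr : d - 255 * (PySem.Int.floordiv (d - 255 - 1) 255 + 1)
      = d - 255 - 255 * PySem.Int.floordiv (d - 255 - 1) 255 := by ring
  simp only [List.flatten_cons, List.cons_append, List.nil_append, hr]

theorem add_delay_eq_alt (d : Int) : add_delay d = add_delay_alt d := by
  by_cases h0 : d ≤ 0
  · unfold add_delay add_delay_alt
    rw [if_neg (by omega), if_pos h0]
  · induction hn : d.toNat using Nat.strong_induction_on generalizing d with
    | _ n ih =>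
      unfold add_delay
      rw [if_pos (by omega)]
      by_cases h : 255 < d
      · rw [if_pos (by omega), add_delay_alt_step d h]
        congr 1
        by_cases h2 : d - 255 ≤ 0
        · omega
        · exact ih (d - 255).toNat (by omega) (d - 255) h2 rfl
      · rw [if_neg (by omega), add_delay_alt_base d (by omega) (by omega)]

-- ===== VERDICT (by name: the statement is the Claim_ definition above) =====
theorem add_delay_spec : Claim_equal_add_delay := by
  intro d _
  unfold Spec_add_delay
  exact add_delay_eq_alt d
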